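-- pv_equiv track=rewrite | github.com/SimJM/Database-System-Project-2 | explore.py | construct_table_name_condition
-- ===== SOURCE A (Python) =====
-- def construct_table_name_condition(query):
--     result = ""
--     lower_case_query = query.lower()  # Use lower() to make the comparison case-insensitive
--     table_names = ['customer', 'lineitem', 'nation', 'orders', 'part', 'partsupp', 'region', 'supplier']
--     for table_name in table_names:
--         if table_name in lower_case_query:  # Check if table is used in the query
--             if result:
--                 result = f"{result} OR relname = '{table_name}'"  # Append comma and new condition
--             else:
--                 result = f"WHERE relname = '{table_name}'"
--
--     return result
-- ===== SOURCE B (Python) =====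
-- def construct_table_name_condition(query):
--     table_names = ['customer', 'lineitem', 'nation', 'orders', 'part', 'partsupp', 'region', 'supplier']
--     q = query.lower()
--     # single left-to-right scan over the query: at each position mark every
--     # table name that starts there (multi-pattern position scan), then format
--     found = set()
--     for i in range(len(q)):
--         for t in table_names:
--             if q[i:i + len(t)] == t:
--                 found.add(t)
--     parts = ["relname = '%s'" % t for t in table_names if t in found]
--     if not parts:
--         return ""
--     return "WHERE " + " OR ".join(parts)
-- ===== Notes on version B (the rewrite author's own statement) =====
-- stated objective: alternative
-- what changed: Replaces A's per-name substring search with incremental accumulator (first-vs-subsequent branch) by a different algorithm: a single position scan over the lowered query that marks in a set every table name starting at each index, followed by a separate filter-and-join formatting pass.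
import Mathlib
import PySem

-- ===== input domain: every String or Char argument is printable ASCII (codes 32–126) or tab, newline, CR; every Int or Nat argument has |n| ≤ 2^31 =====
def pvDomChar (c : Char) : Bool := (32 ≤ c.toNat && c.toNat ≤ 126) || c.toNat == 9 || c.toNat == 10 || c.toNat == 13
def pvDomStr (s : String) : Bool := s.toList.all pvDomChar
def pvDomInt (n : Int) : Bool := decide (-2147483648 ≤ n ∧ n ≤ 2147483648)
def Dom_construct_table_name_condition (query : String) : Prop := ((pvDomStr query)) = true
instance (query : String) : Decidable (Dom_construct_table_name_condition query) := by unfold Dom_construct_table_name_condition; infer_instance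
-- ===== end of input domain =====

-- B replaces A's per-name substring search with its first-vs-subsequent accumulator branch by a
-- single position scan over the query (marking every table name that starts at each position in a
-- set) followed by a separate formatting pass; same output, alternative algorithm.

-- ===== PORT A =====
def pvTableNames : List String :=
  ["customer", "lineitem", "nation", "orders", "part", "partsupp", "region", "supplier"]

def construct_table_name_condition (query : String) : String :=
  let lower_case_query := PySem.Str.lower query
  pvTableNames.foldl
    (fun result table_name =>
      if PySem.Str.isIn table_name lower_case_query then
        if result ≠ "" then
          result ++ " OR relname = '" ++ table_name ++ "'"
        else
          "WHERE relname = '" ++ table_name ++ "'"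
      else result)
    ""

-- ===== PORT B =====
def construct_table_name_condition_alt (query : String) : String :=
  let q := PySem.Str.lower query
  let found : PySem.Set String :=
    (PySem.List.pyRange 0 (PySem.Str.len q) 1).foldl
      (fun found i =>
        pvTableNames.foldl
          (fun found t =>
            if PySem.Str.slice q (some i) (some (i + PySem.Str.len t)) == t then
              PySem.Set.add found t
            else found)
          found)
      PySem.Set.empty
  let parts := (pvTableNames.filter (fun t => PySem.Set.contains found t)).map
      (fun t => "relname = '" ++ t ++ "'")
  if parts = [] then ""
  else "WHERE " ++ PySem.Str.join " OR " parts

-- ===== PRECONDITION & SPEC =====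
def Spec_construct_table_name_condition (query : String) (out : String) : Prop := out = construct_table_name_condition_alt query
instance (query : String) (out : String) : Decidable (Spec_construct_table_name_condition query out) := by unfold Spec_construct_table_name_condition; infer_instance

-- ===== CLAIM (what is proved, stated in full; the proofs are below) =====
def Claim_equal_construct_table_name_condition : Prop := ∀ (query : String), Dom_construct_table_name_condition query → Spec_construct_table_name_condition query (construct_table_name_condition query)

-- ===== LEMMAS AND PROOFS =====
def pvG (t : String) : String := "relname = '" ++ t ++ "'"

def pvRest : List String → String
  | [] => ""
  | t :: ts => " OR " ++ pvG t ++ pvRest ts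

lemma pv_ne_empty (a b : String) (h : b ≠ "") : a ++ b ≠ "" := by
  intro e
  have h2 := congrArg String.toList e
  simp at h2
  exact h h2.2

lemma pv_join_cc (sep a b : String) (rest : List String) :
    PySem.Str.join sep (a :: b :: rest) = a ++ sep ++ PySem.Str.join sep (b :: rest) := by
  rw [← String.toList_inj]
  simp [PySem.Str.toList_join, PySem.Chars.join_cons_cons]

lemma pv_join_single (sep a : String) : PySem.Str.join sep [a] = a := by
  rw [← String.toList_inj]
  simp [PySem.Str.toList_join, PySem.Chars.join_singleton]

lemma pv_lit_or : (" OR relname = '" : String) = " OR " ++ "relname = '" := by decide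

lemma pv_lit_where : ("WHERE relname = '" : String) = "WHERE " ++ "relname = '" := by decide

lemma pv_J (t : String) (l : List String) :
    PySem.Str.join " OR " ((t :: l).map (fun u => "relname = '" ++ u ++ "'"))
      = pvG t ++ pvRest l := by
  induction l generalizing t with
  | nil => simp [pvRest, pvG, pv_join_single]
  | cons u l ih =>
    simp only [List.map_cons] at ih ⊢
    rw [pv_join_cc, ih]
    simp only [pvRest, pvG, String.append_assoc]

lemma pv_inv (lo : String) (ts : List String) (r : String) (h : r ≠ "") :
    ts.foldl
      (fun result table_name =>
        if PySem.Str.isIn table_name lo then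
          if result ≠ "" then
            result ++ " OR relname = '" ++ table_name ++ "'"
          else
            "WHERE relname = '" ++ table_name ++ "'"
        else result) r
      = r ++ pvRest (ts.filter (fun t => PySem.Str.isIn t lo)) := by
  induction ts generalizing r with
  | nil => simp [pvRest]
  | cons t ts ih =>
    cases hc : PySem.Str.isIn t lo with
    | false =>
      simp only [List.foldl_cons, List.filter_cons, hc, Bool.false_eq_true, if_false]
      exact ih r h
    | true =>
      simp only [List.foldl_cons, List.filter_cons, hc, if_true]
      rw [if_pos h, ih _ (pv_ne_empty _ _ (by decide)),
          pvRest, pv_lit_or]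
      simp only [pvG, String.append_assoc]

-- A's accumulator loop equals filter-by-isIn then format.
lemma pv_main (lo : String) (ts : List String) :
    ts.foldl
      (fun result table_name =>
        if PySem.Str.isIn table_name lo then
          if result ≠ "" then
            result ++ " OR relname = '" ++ table_name ++ "'"
          else
            "WHERE relname = '" ++ table_name ++ "'"
        else result) ""
      = (if ts.filter (fun t => PySem.Str.isIn t lo) = [] then ""
         else "WHERE " ++ PySem.Str.join " OR "
           ((ts.filter (fun t => PySem.Str.isIn t lo)).map
             (fun t => "relname = '" ++ t ++ "'"))) := by
  induction ts with
  | nil => simp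
  | cons t ts ih =>
    cases hc : PySem.Str.isIn t lo with
    | false =>
      simp only [List.foldl_cons, List.filter_cons, hc, Bool.false_eq_true, if_false]
      exact ih
    | true =>
      simp only [List.foldl_cons, List.filter_cons, hc, if_true]
      rw [if_neg (by simp), if_neg (List.cons_ne_nil _ _),
          pv_inv lo ts _ (pv_ne_empty _ _ (by decide)),
          pv_J, pv_lit_where]
      simp only [pvG, String.append_assoc]

-- membership after the inner pass over the name list
lemma pv_mem_inner (c : String → Bool) (ns : List String) (s : PySem.Set String) (x : String) :
    x ∈ ns.foldl (fun s t => if c t then PySem.Set.add s t else s) s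
      ↔ x ∈ s ∨ (x ∈ ns ∧ c x = true) := by
  induction ns generalizing s with
  | nil => simp
  | cons t ns ih =>
    simp only [List.foldl_cons]
    cases hc : c t with
    | false =>
      rw [if_neg Bool.false_ne_true, ih]
      constructor
      · rintro (h | ⟨h1, h2⟩)
        · exact Or.inl h
        · exact Or.inr ⟨List.mem_cons_of_mem _ h1, h2⟩
      · rintro (h | ⟨h1, h2⟩)
        · exact Or.inl h
        · rcases List.mem_cons.mp h1 with h1 | h1
          · subst h1; rw [hc] at h2; exact absurd h2 (by simp)
          · exact Or.inr ⟨h1, h2⟩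
    | true =>
      rw [if_pos rfl, ih]
      simp only [PySem.Set.mem_add]
      constructor
      · rintro ((h | h) | ⟨h1, h2⟩)
        · exact Or.inl h
        · subst h; exact Or.inr ⟨List.mem_cons_self, hc⟩
        · exact Or.inr ⟨List.mem_cons_of_mem _ h1, h2⟩
      · rintro (h | ⟨h1, h2⟩)
        · exact Or.inl (Or.inl h)
        · rcases List.mem_cons.mp h1 with h1 | h1
          · subst h1; exact Or.inl (Or.inr rfl)
          · exact Or.inr ⟨h1, h2⟩

-- membership in the set built by the position scan
lemma pv_mem_scan (c : Int → String → Bool) (L : List Int) (ns : List String)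
    (s : PySem.Set String) (x : String) :
    x ∈ L.foldl (fun s i => ns.foldl (fun s t => if c i t then PySem.Set.add s t else s) s) s
      ↔ x ∈ s ∨ (x ∈ ns ∧ ∃ i ∈ L, c i x = true) := by
  induction L generalizing s with
  | nil => simp
  | cons i L ih =>
    simp only [List.foldl_cons, ih, pv_mem_inner, List.mem_cons]
    constructor
    · rintro ((h | ⟨h1, h2⟩) | ⟨h1, j, hj, hc⟩)
      · exact Or.inl h
      · exact Or.inr ⟨h1, i, Or.inl rfl, h2⟩
      · exact Or.inr ⟨h1, j, Or.inr hj, hc⟩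
    · rintro (h | ⟨h1, j, (hj | hj), hc⟩)
      · exact Or.inl (Or.inl h)
      · subst hj; exact Or.inl (Or.inr ⟨h1, hc⟩)
      · exact Or.inr ⟨h1, j, hj, hc⟩

-- a nonempty pattern occurs as an infix iff it starts at some position of the string
lemma pv_infix_iff (t q : List Char) (ht : t ≠ []) :
    t <:+: q ↔ ∃ j : Nat, j < q.length ∧ (q.drop j).take t.length = t := by
  constructor
  · rintro ⟨s₁, s₂, rfl⟩
    refine ⟨s₁.length, ?_, ?_⟩
    · have : 1 ≤ t.length := List.length_pos_iff.mpr ht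
      simp only [List.length_append]
      omega
    · rw [List.append_assoc, List.drop_left, List.take_left]
  · rintro ⟨j, _, h⟩
    have hp : t <+: q.drop j := h ▸ List.take_prefix _ _
    obtain ⟨r, hr⟩ := hp
    exact ⟨q.take j, r, by rw [List.append_assoc, hr, List.take_append_drop]⟩

-- the scan's test at a valid position, on char lists
lemma pv_check_eq (q t : String) (j : Nat) :
    (PySem.Str.slice q (some (j : Int)) (some ((j : Int) + PySem.Str.len t)) == t)
      = decide ((q.toList.drop j).take t.toList.length = t.toList) := by
  have hl : PySem.Str.len t = (t.toList.length : Int) := by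
    simp [PySem.Str.len_eq]
  rw [hl]
  have : (PySem.Str.slice q (some (j : Int)) (some ((j : Int) + (t.toList.length : Int)))).toList
      = (q.toList.drop j).take t.toList.length := by
    rw [PySem.Str.toList_slice, PySem.Chars.slice_eq_listSlice, PySem.List.slice_natCast_add]
  rw [Bool.eq_iff_iff, beq_iff_eq, decide_eq_true_eq, ← String.toList_inj, this]

-- Set.contains of the scanned set = Python's 'in' test, for each (nonempty) table name
lemma pv_contains_eq_isIn (q t : String) (hmem : t ∈ pvTableNames) :
    PySem.Set.contains
      ((PySem.List.pyRange 0 (PySem.Str.len q) 1).foldl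
        (fun found i =>
          pvTableNames.foldl
            (fun found u =>
              if PySem.Str.slice q (some i) (some (i + PySem.Str.len u)) == u then
                PySem.Set.add found u
              else found)
            found)
        PySem.Set.empty) t
      = PySem.Str.isIn t q := by
  have ht : t.toList ≠ [] := by
    fin_cases hmem <;> decide
  cases hin : PySem.Str.isIn t q with
  | true =>
    rw [PySem.Str.isIn_eq, PySem.Chars.isIn_iff_infix] at hin
    obtain ⟨j, hj, hsl⟩ := (pv_infix_iff _ _ ht).mp hin
    apply (PySem.Set.contains_iff _ _).mpr
    rw [pv_mem_scan]
    refine Or.inr ⟨hmem, (j : Int), ?_, ?_⟩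
    · rw [PySem.List.mem_pyRange_one]
      constructor
      · exact_mod_cast Nat.zero_le j
      · rw [PySem.Str.len_eq]
        exact_mod_cast hj
    · rw [pv_check_eq]
      exact decide_eq_true hsl
  | false =>
    apply Bool.eq_false_iff.mpr
    intro hcon
    have hm := (PySem.Set.contains_iff _ _).mp hcon
    rw [pv_mem_scan] at hm
    rcases hm with h | ⟨_, i, hi, hc⟩
    · simp [PySem.Set.empty] at h
    · rw [PySem.List.mem_pyRange_one] at hi
      obtain ⟨hi0, hin'⟩ := hi
      obtain ⟨j, rfl⟩ := Int.eq_ofNat_of_zero_le hi0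
      rw [pv_check_eq] at hc
      have hsl := of_decide_eq_true hc
      have hj : j < q.toList.length := by
        rw [PySem.Str.len_eq] at hin'
        exact_mod_cast hin'
      have : PySem.Chars.isIn t.toList q.toList = true :=
        (PySem.Chars.isIn_iff_infix _ _).mpr ((pv_infix_iff _ _ ht).mpr ⟨j, hj, hsl⟩)
      rw [PySem.Str.isIn_eq, this] at hin
      exact Bool.false_ne_true hin.symm

-- ===== VERDICT (by name: the statement is the Claim_ definition above) =====
theorem construct_table_name_condition_spec : Claim_equal_construct_table_name_condition := by
  intro query _
  show construct_table_name_condition query = construct_table_name_condition_alt query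
  unfold construct_table_name_condition construct_table_name_condition_alt
  rw [pv_main]
  have hfilter :
      pvTableNames.filter (fun t => PySem.Str.isIn t (PySem.Str.lower query))
        = pvTableNames.filter (fun t =>
            PySem.Set.contains
              ((PySem.List.pyRange 0 (PySem.Str.len (PySem.Str.lower query)) 1).foldl
                (fun found i =>
                  pvTableNames.foldl
                    (fun found u =>
                      if PySem.Str.slice (PySem.Str.lower query) (some i)
                          (some (i + PySem.Str.len u)) == u then
                        PySem.Set.add found u
                      else found)
                    found)
                PySem.Set.empty) t) := by
    apply List.filter_congr
    intro t hmem
    exact (pv_contains_eq_isIn (PySem.Str.lower query) t hmem).symm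
  rw [hfilter]
  simp only [List.map_eq_nil_iff]
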